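-- pv_equiv track=rewrite | github.com/rioquinn11/tamidchatmatcher | embedder/embed_professional.py | build_professional_text
-- ===== SOURCE A (Python) =====
-- PROFESSIONAL_COLUMNS: list[str] = [
--     "Company Name",
--     "Coop Name",
--     "Full Time Company",
--     "Industry",
--     "Major(s)",
--     "Minor(s)",
--     "Skills/Tags",
--     "TAMID Class",
--     "Track Involvement",
-- ]
--
-- PROFILE_PROFESSIONAL_COLUMNS: frozenset[str] = frozenset({"Major(s)", "Minor(s)"})
--
-- def _merge_column_across_rows(rows: list[dict], col: str) -> str | None:
--     seen: set[str] = set()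
--     ordered: list[str] = []
--     for row in rows:
--         val = row.get(col)
--         if val is None:
--             continue
--         s = str(val).strip()
--         if not s or s in seen:
--             continue
--         seen.add(s)
--         ordered.append(s)
--     return ", ".join(ordered) if ordered else None
--
-- def profile_value_for_column(profile_row: dict, col: str) -> str | None:
--     v = profile_row.get(col)
--     if v is None:
--         return None
--     s = str(v).strip()
--     return s if s else None
--
-- def build_professional_text(rows: list[dict], profile_row: dict | None) -> str:
--     segments: list[str] = []
--     for col in PROFESSIONAL_COLUMNS:
--         merged = _merge_column_across_rows(rows, col)
--         if not merged and profile_row and col in PROFILE_PROFESSIONAL_COLUMNS: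
--             merged = profile_value_for_column(profile_row, col)
--         if merged:
--             segments.append(merged)
--     return ", ".join(segments)
-- ===== SOURCE B (Python) =====
-- PROFESSIONAL_COLUMNS: list[str] = [
--     "Company Name",
--     "Coop Name",
--     "Full Time Company",
--     "Industry",
--     "Major(s)",
--     "Minor(s)",
--     "Skills/Tags",
--     "TAMID Class",
--     "Track Involvement",
-- ]
--
-- PROFILE_PROFESSIONAL_COLUMNS: frozenset[str] = frozenset({"Major(s)", "Minor(s)"})
--
--
-- def _absorb(row: dict, col: str, lst: list[str]) -> list[str]:
--     """Fold one row's value for `col` into the ordered distinct list."""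
--     val = row.get(col)
--     if val is None:
--         return lst
--     s = str(val).strip()
--     if not s or s in lst:
--         return lst
--     return lst + [s]
--
--
-- def build_professional_text(rows: list[dict], profile_row: dict | None) -> str:
--     # One pass over rows: advance all nine column accumulators per row.
--     acc: list[list[str]] = [[] for _ in PROFESSIONAL_COLUMNS]
--     for row in rows:
--         acc = [_absorb(row, col, lst) for col, lst in zip(PROFESSIONAL_COLUMNS, acc)]
--     segments: list[str] = []
--     for col, lst in zip(PROFESSIONAL_COLUMNS, acc):
--         merged = ", ".join(lst) if lst else None
--         if not merged and profile_row and col in PROFILE_PROFESSIONAL_COLUMNS: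
--             v = profile_row.get(col)
--             merged = (str(v).strip() or None) if v is not None else None
--         if merged:
--             segments.append(merged)
--     return ", ".join(segments)
-- ===== Notes on version B (the rewrite author's own statement) =====
-- stated objective: alternative
-- what changed: Replaces the nine per-column rescans of rows (one _merge_column_across_rows pass per PROFESSIONAL_COLUMNS entry, each with its own seen-set) by a single pass over rows that advances all nine ordered distinct-value accumulators per row, then assembles the segments from the accumulators.
import Mathlib
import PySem

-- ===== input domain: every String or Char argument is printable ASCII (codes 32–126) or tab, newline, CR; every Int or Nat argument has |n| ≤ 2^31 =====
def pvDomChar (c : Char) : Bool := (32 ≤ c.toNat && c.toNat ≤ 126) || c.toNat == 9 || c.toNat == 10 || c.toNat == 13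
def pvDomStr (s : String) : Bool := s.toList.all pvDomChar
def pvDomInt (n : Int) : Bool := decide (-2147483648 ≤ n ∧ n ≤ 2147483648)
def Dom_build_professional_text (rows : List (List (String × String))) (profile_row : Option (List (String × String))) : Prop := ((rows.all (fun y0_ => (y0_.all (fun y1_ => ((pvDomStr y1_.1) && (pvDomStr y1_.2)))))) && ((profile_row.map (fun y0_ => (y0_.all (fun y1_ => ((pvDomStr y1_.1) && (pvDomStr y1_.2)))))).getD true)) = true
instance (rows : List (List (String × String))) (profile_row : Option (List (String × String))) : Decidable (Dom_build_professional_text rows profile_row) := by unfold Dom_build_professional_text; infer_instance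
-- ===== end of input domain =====

-- B replaces the nine per-column rescans of `rows` by a single pass that advances all nine
-- column accumulators per row (alternative decomposition; return value proved identical).


-- ===== PORT A =====
def pvColsA : List String :=
  ["Company Name", "Coop Name", "Full Time Company", "Industry", "Major(s)",
   "Minor(s)", "Skills/Tags", "TAMID Class", "Track Involvement"]

def pvProfileColsA : PySem.Set String := PySem.Set.ofList ["Major(s)", "Minor(s)"]

-- `if not merged` / `if merged`: a str|None is falsy iff it is None or the empty string
def pvFalsyA : Option String → Bool
  | none => true
  | some s => s = ""

-- `if … and profile_row …`: a dict|None is truthy iff it is a non-empty dict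
def pvTruthyA : Option (List (String × String)) → Bool
  | none => false
  | some l => !l.isEmpty

-- loop body of _merge_column_across_rows, state (seen, ordered)
def pvMergeStepA (col : String) (st : PySem.Set String × List String)
    (row : List (String × String)) : PySem.Set String × List String :=
  match PySem.Dict.get? (PySem.Dict.mk row) col with
  | none => st
  | some val =>
    let s := PySem.Str.strip val
    if s = "" ∨ PySem.Set.contains st.1 s = true then st
    else (PySem.Set.add st.1 s, st.2 ++ [s])

def pvMergeColumnAcrossRows (rows : List (List (String × String))) (col : String) : Option String :=
  let st := rows.foldl (pvMergeStepA col) (PySem.Set.empty, [])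
  if st.2 = [] then none else some (PySem.Str.join ", " st.2)

def pvProfileValueForColumn (profile_row : List (String × String)) (col : String) : Option String :=
  match PySem.Dict.get? (PySem.Dict.mk profile_row) col with
  | none => none
  | some v =>
    let s := PySem.Str.strip v
    if s = "" then none else some s

-- loop body over PROFESSIONAL_COLUMNS in build_professional_text
def pvSegStepA (rows : List (List (String × String))) (profile_row : Option (List (String × String)))
    (segs : List String) (col : String) : List String :=
  let merged := pvMergeColumnAcrossRows rows col
  let merged :=
    if pvFalsyA merged && pvTruthyA profile_row && PySem.Set.contains pvProfileColsA col then
      match profile_row with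
      | none => merged
      | some pr => pvProfileValueForColumn pr col
    else merged
  if pvFalsyA merged then segs else segs ++ [merged.getD ""]

def build_professional_text (rows : List (List (String × String))) (profile_row : Option (List (String × String))) : String :=
  let segments := pvColsA.foldl (pvSegStepA rows profile_row) []
  PySem.Str.join ", " segments

-- ===== PORT B =====
def pvColsB : List String :=
  ["Company Name", "Coop Name", "Full Time Company", "Industry", "Major(s)",
   "Minor(s)", "Skills/Tags", "TAMID Class", "Track Involvement"]

def pvProfileColsB : PySem.Set String := PySem.Set.ofList ["Major(s)", "Minor(s)"]

def pvFalsyB : Option String → Bool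
  | none => true
  | some s => s = ""

def pvTruthyB : Option (List (String × String)) → Bool
  | none => false
  | some l => !l.isEmpty

-- _absorb: fold one row's value for `col` into the ordered distinct list
def pvAbsorb (row : List (String × String)) (col : String) (lst : List String) : List String :=
  match PySem.Dict.get? (PySem.Dict.mk row) col with
  | none => lst
  | some val =>
    let s := PySem.Str.strip val
    if s = "" ∨ s ∈ lst then lst
    else lst ++ [s]

-- loop body over zip(PROFESSIONAL_COLUMNS, acc) in build_professional_text (B)
def pvSegStepB (profile_row : Option (List (String × String)))
    (segs : List String) (col : String) (lst : List String) : List String :=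
  let merged : Option String := if lst.isEmpty then none else some (PySem.Str.join ", " lst)
  let merged :=
    if pvFalsyB merged && pvTruthyB profile_row && PySem.Set.contains pvProfileColsB col then
      match profile_row with
      | none => merged
      | some pr =>
        match PySem.Dict.get? (PySem.Dict.mk pr) col with
        | none => none
        | some v =>
          let s := PySem.Str.strip v
          if s = "" then none else some s
    else merged
  if pvFalsyB merged then segs else segs ++ [merged.getD ""]

def build_professional_text_alt (rows : List (List (String × String))) (profile_row : Option (List (String × String))) : String :=
  let acc := rows.foldl
    (fun acc row => (pvColsB.zip acc).map (fun p => pvAbsorb row p.1 p.2))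
    (pvColsB.map (fun _ => ([] : List String)))
  let segments := (pvColsB.zip acc).foldl (fun segs p => pvSegStepB profile_row segs p.1 p.2) []
  PySem.Str.join ", " segments

-- ===== PRECONDITION & SPEC =====
def Spec_build_professional_text (rows : List (List (String × String))) (profile_row : Option (List (String × String))) (out : String) : Prop := out = build_professional_text_alt rows profile_row
instance (rows : List (List (String × String))) (profile_row : Option (List (String × String))) (out : String) : Decidable (Spec_build_professional_text rows profile_row out) := by unfold Spec_build_professional_text; infer_instance

-- ===== CLAIM (what is proved, stated in full; the proofs are below) =====
def Claim_equal_build_professional_text : Prop := ∀ (rows : List (List (String × String))) (profile_row : Option (List (String × String))), Dom_build_professional_text rows profile_row → Spec_build_professional_text rows profile_row (build_professional_text rows profile_row)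

-- ===== LEMMAS AND PROOFS =====

-- zip a list with a map of itself, then map/fold over the pairs
theorem pv_map_zip_map {α β γ : Type} (l : List α) (f : α → β) (g : α → β → γ) :
    (l.zip (l.map f)).map (fun p => g p.1 p.2) = l.map (fun c => g c (f c)) := by
  induction l with
  | nil => rfl
  | cons a t ih => simp [ih]

theorem pv_foldl_zip_map {α β σ : Type} (l : List α) (f : α → β) (g : σ → α → β → σ) (init : σ) :
    (l.zip (l.map f)).foldl (fun s p => g s p.1 p.2) init = l.foldl (fun s c => g s c (f c)) init := by
  induction l generalizing init with
  | nil => rfl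
  | cons a t ih => simp [ih]

-- B's row pass distributes over the per-column folds
theorem pv_acc_eq (rows : List (List (String × String))) (f : String → List String) :
    rows.foldl (fun acc row => (pvColsB.zip acc).map (fun p => pvAbsorb row p.1 p.2)) (pvColsB.map f)
      = pvColsB.map (fun c => rows.foldl (fun lst row => pvAbsorb row c lst) (f c)) := by
  induction rows generalizing f with
  | nil => rfl
  | cons r rs ih =>
    simp only [List.foldl_cons]
    rw [pv_map_zip_map pvColsB f (fun c lst => pvAbsorb r c lst), ih]

-- A's (seen, ordered) fold projects to B's ordered-list fold
theorem pv_merge_eq_absorb (col : String) (rows : List (List (String × String))) (L : List String) :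
    rows.foldl (pvMergeStepA col) (PySem.Set.ofList L, L)
      = (PySem.Set.ofList (rows.foldl (fun lst row => pvAbsorb row col lst) L),
         rows.foldl (fun lst row => pvAbsorb row col lst) L) := by
  induction rows generalizing L with
  | nil => rfl
  | cons r rs ih =>
    simp only [List.foldl_cons]
    have hstep : pvMergeStepA col (PySem.Set.ofList L, L) r
        = (PySem.Set.ofList (pvAbsorb r col L), pvAbsorb r col L) := by
      unfold pvMergeStepA pvAbsorb
      cases PySem.Dict.get? (PySem.Dict.mk r) col with
      | none => rfl
      | some v =>
        simp only
        have hc : (PySem.Set.contains (PySem.Set.ofList L) (PySem.Str.strip v) = true)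
            ↔ PySem.Str.strip v ∈ L := by
          simp [PySem.Set.mem_ofList]
        by_cases hs : PySem.Str.strip v = ""
        · simp [hs]
        · by_cases hmem : PySem.Str.strip v ∈ L
          · simp [hs, hmem]
          · have hnc : PySem.Set.contains (PySem.Set.ofList L) (PySem.Str.strip v) ≠ true :=
              fun h => hmem (hc.mp h)
            have hadd : PySem.Set.add (PySem.Set.ofList L) (PySem.Str.strip v)
                = PySem.Set.ofList (L ++ [PySem.Str.strip v]) :=
              (PySem.Set.ofList_append_singleton L (PySem.Str.strip v)).symm
            simp [hs, hmem]
            rw [PySem.Set.ofList_append_singleton,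
                PySem.Set.add_of_not_mem (by simp [PySem.Set.mem_ofList, hmem])]
    rw [hstep, ih]

-- the two per-column segment bodies agree
theorem pv_segstep_eq (rows : List (List (String × String))) (profile_row : Option (List (String × String)))
    (segs : List String) (col : String) :
    pvSegStepA rows profile_row segs col
      = pvSegStepB profile_row segs col (rows.foldl (fun lst row => pvAbsorb row col lst) []) := by
  have hm : pvMergeColumnAcrossRows rows col
      = (if (rows.foldl (fun lst row => pvAbsorb row col lst) []).isEmpty then none
         else some (PySem.Str.join ", " (rows.foldl (fun lst row => pvAbsorb row col lst) []))) := by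
    unfold pvMergeColumnAcrossRows
    rw [show (PySem.Set.empty, ([] : List String)) = ((PySem.Set.ofList [] : PySem.Set String), ([] : List String)) from rfl,
        pv_merge_eq_absorb]
    simp [List.isEmpty_iff]
  unfold pvSegStepA pvSegStepB
  rw [hm]
  rfl

-- ===== VERDICT (by name: the statement is the Claim_ definition above) =====
theorem build_professional_text_spec : Claim_equal_build_professional_text := by
  intro rows profile_row _
  unfold Spec_build_professional_text
  simp only [build_professional_text, build_professional_text_alt]
  rw [pv_acc_eq rows (fun _ => []),
      pv_foldl_zip_map pvColsB (fun c => rows.foldl (fun lst row => pvAbsorb row c lst) [])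
        (pvSegStepB profile_row) []]
  apply congrArg
  have hcols : pvColsA = pvColsB := rfl
  rw [hcols]
  exact PySem.List.foldl_congr_mem pvColsB _ _ []
    (fun segs col _ => pv_segstep_eq rows profile_row segs col)
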